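-- pv_equiv track=rewrite | github.com/teamsspaul/Thinkpad | Old_Code/Pertubation stuff/compiled_info/functions.py | find_none
-- ===== SOURCE A (Python) =====
-- def find_none(list1):
--     """
--     This function finds the range of 'None' values in a list. Output will be string listing out ranges of 'None'
--     preceeded by a number and the word to, for example "2 to 3-6". This means the value stored in list1[2] needs
--     to be copied over to list1[3], list1[4], lits1[5], and list1[6]. This assumes that 'None' values are assigned
--     so that the first value found above it should be its value.
--     Example: IF list1=["Name1","None","None","None","Name2","None"] this function would return "0 to 1-3,4 to 5"
--     Meaning the value found in list1[0] should be stored in list1[1],list1[2], and list1[3].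
--     """
--     tracker=0
--     counter=0
--     string=""
--     Cycles=len(list1)-1
--     for i in list1:
--         if('None' in i and tracker==0):
--             tracker=1
--             string=string+str(counter-1)+" to "+str(counter)
--             Start=counter
--         if('None' not in i and tracker!=0):
--             tracker=0
--             string=string+"-"+str(counter-1)+","
--         if(counter==Cycles and tracker!=0 and counter != Start):
--             string=string+"-"+str(counter)
--         counter=counter+1
--     return(string)
-- ===== SOURCE B (Python) =====
-- def find_none(list1):
--     # Phase 1 (backward scan): collect maximal runs of 'None'-containing
--     # elements as (start, end) index pairs, building the run list back-to-front.
--     runs = []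
--     for i in range(len(list1) - 1, -1, -1):
--         if 'None' in list1[i]:
--             if runs and runs[0][0] == i + 1:
--                 runs[0] = (i, runs[0][1])
--             else:
--                 runs.insert(0, (i, i))
--     # Phase 2: format each run independently.
--     last = len(list1) - 1
--     parts = []
--     for s, e in runs:
--         piece = str(s - 1) + " to " + str(s)
--         if e == last:
--             if e != s:
--                 piece += "-" + str(e)
--         else:
--             piece += "-" + str(e) + ","
--         parts.append(piece)
--     return "".join(parts)
-- ===== Notes on version B (the rewrite author's own statement) =====
-- stated objective: alternative
-- what changed: A builds the output string in one pass with a tracker/Start state machine; B first collects the maximal 'None'-runs as (start,end) index pairs (built back-to-front by a backward scan) and then formats each run independently in a separate pass.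
import Mathlib
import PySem

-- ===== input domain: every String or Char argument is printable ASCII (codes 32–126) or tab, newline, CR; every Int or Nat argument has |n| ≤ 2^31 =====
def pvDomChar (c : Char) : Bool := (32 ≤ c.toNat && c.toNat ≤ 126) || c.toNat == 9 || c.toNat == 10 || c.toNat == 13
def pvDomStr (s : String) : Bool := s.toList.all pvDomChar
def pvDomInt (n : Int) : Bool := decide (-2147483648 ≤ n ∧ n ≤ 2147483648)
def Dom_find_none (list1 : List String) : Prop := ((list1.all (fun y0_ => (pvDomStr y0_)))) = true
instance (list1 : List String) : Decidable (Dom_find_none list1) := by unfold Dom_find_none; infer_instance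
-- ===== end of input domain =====

-- B replaces A's one-pass tracker/Start state machine by two phases — collect the
-- maximal 'None'-runs (built back-to-front), then format each run independently
-- (objective: alternative decomposition, same cost).

-- ===== PORT A =====
-- A's for-loop over list1 with state (tracker, counter, string, Start); Cycles, start passed along.
def findNoneLoop : List String → Int → Int → List Char → Int → Int → List Char
  | [], _, _, string, _, _ => string
  | i :: rest, tracker, counter, string, cycles, start =>
    let nin := PySem.Str.isIn "None" i
    -- if('None' in i and tracker==0)
    let p1 : Int × List Char × Int :=
      if nin ∧ tracker = 0 then
        (1, string ++ PySem.Int.toChars (counter - 1) ++ (" to ").toList ++ PySem.Int.toChars counter, counter)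
      else (tracker, string, start)
    -- if('None' not in i and tracker!=0)
    let p2 : Int × List Char :=
      if ¬(nin = true) ∧ ¬(p1.1 = 0) then
        (0, p1.2.1 ++ ("-").toList ++ PySem.Int.toChars (counter - 1) ++ (",").toList)
      else (p1.1, p1.2.1)
    -- if(counter==Cycles and tracker!=0 and counter != Start)
    let string3 :=
      if counter = cycles ∧ ¬(p2.1 = 0) ∧ ¬(counter = p1.2.2) then
        p2.2 ++ ("-").toList ++ PySem.Int.toChars counter
      else p2.2
    findNoneLoop rest p2.1 (counter + 1) string3 cycles p1.2.2

def find_none (list1 : List String) : String :=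
  String.ofList (findNoneLoop list1 0 0 [] ((list1.length : Int) - 1) 0)

-- ===== PORT B =====
-- Source B phase 1: the backward index loop 'for i in range(len-1,-1,-1)' building runs
-- back-to-front (runs[0]-merge / insert(0,…)), as the structural right-to-left recursion.
def noneRuns : List String → Int → List (Int × Int)
  | [], _ => []
  | x :: xs, i =>
    let runs := noneRuns xs (i + 1)
    if PySem.Str.isIn "None" x then
      match runs with
      | (s, e) :: tail => if s = i + 1 then (i, e) :: tail else (i, i) :: (s, e) :: tail
      | [] => [(i, i)]
    else runs

-- Source B phase 2: format one run (s, e)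
def fmtRun (last : Int) (r : Int × Int) : List Char :=
  PySem.Int.toChars (r.1 - 1) ++ (" to ").toList ++ PySem.Int.toChars r.1 ++
    (if r.2 = last then (if ¬(r.2 = r.1) then ("-").toList ++ PySem.Int.toChars r.2 else [])
     else ("-").toList ++ PySem.Int.toChars r.2 ++ (",").toList)

-- "".join(parts)
def fmtAll (last : Int) : List (Int × Int) → List Char
  | [] => []
  | r :: rs => fmtRun last r ++ fmtAll last rs

def find_none_alt (list1 : List String) : String :=
  String.ofList (fmtAll ((list1.length : Int) - 1) (noneRuns list1 0))

-- ===== PRECONDITION & SPEC =====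
def Spec_find_none (list1 : List String) (out : String) : Prop := out = find_none_alt list1
instance (list1 : List String) (out : String) : Decidable (Spec_find_none list1 out) := by unfold Spec_find_none; infer_instance

-- ===== CLAIM (what is proved, stated in full; the proofs are below) =====
def Claim_equal_find_none : Prop := ∀ (list1 : List String), Dom_find_none list1 → Spec_find_none list1 (find_none list1)

-- ===== LEMMAS AND PROOFS =====

-- the closing part of a run that started at st and ended at e
def closePart (cy st e : Int) : List Char :=
  if e = cy then (if ¬(e = st) then ("-").toList ++ PySem.Int.toChars e else [])
  else ("-").toList ++ PySem.Int.toChars e ++ (",").toList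

theorem fmtRun_eq (cy s e : Int) :
    fmtRun cy (s, e) =
      PySem.Int.toChars (s - 1) ++ (" to ").toList ++ PySem.Int.toChars s ++ closePart cy s e := by
  simp [fmtRun, closePart]

theorem noneRuns_start_ge : ∀ (l : List String) (i s e : Int) (rest : List (Int × Int)),
    noneRuns l i = (s, e) :: rest → i ≤ s := by
  intro l
  induction l with
  | nil => intro i s e rest h; simp [noneRuns] at h
  | cons x xs ih =>
    intro i s e rest h
    simp only [noneRuns] at h
    split at h
    · split at h
      · split at h
        · simp only [List.cons.injEq, Prod.mk.injEq] at h
          exact le_of_eq h.1.1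
        · simp only [List.cons.injEq, Prod.mk.injEq] at h
          exact le_of_eq h.1.1
      · simp only [List.cons.injEq, Prod.mk.injEq] at h
        exact le_of_eq h.1.1
    · have := ih (i + 1) s e rest h
      omega

theorem findNoneLoop_app : ∀ (l : List String) (t c : Int) (a b : List Char) (cy st : Int),
    findNoneLoop l t c (a ++ b) cy st = a ++ findNoneLoop l t c b cy st := by
  intro l
  induction l with
  | nil => intros; simp [findNoneLoop]
  | cons x xs ih =>
    intro t c a b cy st
    simp only [findNoneLoop]
    split_ifs <;> simp only [List.append_assoc] <;> rw [ih]

theorem findNoneLoop_acc : ∀ (l : List String) (t c : Int) (acc : List Char) (cy st : Int),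
    findNoneLoop l t c acc cy st = acc ++ findNoneLoop l t c [] cy st := by
  intro l t c acc cy st
  have := findNoneLoop_app l t c acc [] cy st
  simpa using this

-- one step of A's loop, tracker = 0, 'None' in head
theorem stepA0_none (x : String) (xs : List String) (c cy st : Int)
    (hx : PySem.Chars.isIn ['N', 'o', 'n', 'e'] x.toList = true) :
    findNoneLoop (x :: xs) 0 c [] cy st =
      findNoneLoop xs 1 (c + 1)
        (PySem.Int.toChars (c - 1) ++ (" to ").toList ++ PySem.Int.toChars c) cy c := by
  simp [findNoneLoop, hx]

theorem stepA0_not (x : String) (xs : List String) (c cy st : Int)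
    (hx : PySem.Chars.isIn ['N', 'o', 'n', 'e'] x.toList = false) :
    findNoneLoop (x :: xs) 0 c [] cy st = findNoneLoop xs 0 (c + 1) [] cy st := by
  simp [findNoneLoop, hx]

theorem stepA1_none (x : String) (xs : List String) (c cy st : Int)
    (hx : PySem.Chars.isIn ['N', 'o', 'n', 'e'] x.toList = true) :
    findNoneLoop (x :: xs) 1 c [] cy st =
      findNoneLoop xs 1 (c + 1)
        (if c = cy ∧ ¬(c = st) then ("-").toList ++ PySem.Int.toChars c else []) cy st := by
  simp [findNoneLoop, hx]

theorem stepA1_not (x : String) (xs : List String) (c cy st : Int)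
    (hx : PySem.Chars.isIn ['N', 'o', 'n', 'e'] x.toList = false) :
    findNoneLoop (x :: xs) 1 c [] cy st =
      findNoneLoop xs 0 (c + 1)
        (("-").toList ++ PySem.Int.toChars (c - 1) ++ (",").toList) cy st := by
  simp [findNoneLoop, hx]

theorem noneRuns_cons_none (x : String) (xs : List String) (c : Int)
    (hx : PySem.Chars.isIn ['N', 'o', 'n', 'e'] x.toList = true) :
    noneRuns (x :: xs) c =
      (match noneRuns xs (c + 1) with
       | (s, e) :: tail => if s = c + 1 then (c, e) :: tail else (c, c) :: (s, e) :: tail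
       | [] => [(c, c)]) := by
  simp [noneRuns, hx]

theorem noneRuns_cons_not (x : String) (xs : List String) (c : Int)
    (hx : PySem.Chars.isIn ['N', 'o', 'n', 'e'] x.toList = false) :
    noneRuns (x :: xs) c = noneRuns xs (c + 1) := by
  simp [noneRuns, hx]

-- main invariant, both tracker states at once
theorem main_inv : ∀ (l : List String) (cy c st : Int), c + l.length = cy + 1 →
    (findNoneLoop l 0 c [] cy st = fmtAll cy (noneRuns l c)) ∧
    (l ≠ [] → findNoneLoop l 1 c [] cy st =
      (match noneRuns l c with
       | (s, e) :: rest =>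
         if s = c then closePart cy st e ++ fmtAll cy rest
         else ("-").toList ++ PySem.Int.toChars (c - 1) ++ (",").toList ++ fmtAll cy (noneRuns l c)
       | [] => ("-").toList ++ PySem.Int.toChars (c - 1) ++ (",").toList)) := by
  intro l
  induction l with
  | nil =>
    intro cy c st _
    exact ⟨by simp [findNoneLoop, noneRuns, fmtAll], by simp⟩
  | cons x xs ih =>
    intro cy c st h
    have hlen : (c + 1) + (xs.length : Int) = cy + 1 := by
      simp only [List.length_cons] at h; push_cast at h ⊢; omega
    by_cases hx : PySem.Chars.isIn ['N', 'o', 'n', 'e'] x.toList = true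
    · constructor
      · -- tracker = 0, head is a None: a new run opens at c
        rw [stepA0_none x xs c cy st hx, findNoneLoop_acc]
        rcases xs with _ | ⟨y, ys⟩
        · have hc : c = cy := by simp at hlen; omega
          subst hc
          simp [findNoneLoop, noneRuns, hx, fmtAll, fmtRun]
        · have hcy : c < cy := by
            have h1 : (1 : Int) ≤ ((y :: ys).length : Int) := by
              simp only [List.length_cons]; push_cast; omega
            omega
          have hthis := (ih cy (c + 1) c hlen).2 (by simp)
          rw [noneRuns_cons_none x (y :: ys) c hx]
          cases hr : noneRuns (y :: ys) (c + 1) with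
          | nil =>
            rw [hr] at hthis
            simp only at hthis
            have e1 : c + 1 - 1 = c := by ring
            rw [e1] at hthis
            rw [hthis]
            simp [fmtAll, fmtRun, hcy.ne, List.append_assoc]
          | cons p tail =>
            obtain ⟨s, e⟩ := p
            rw [hr] at hthis
            simp only at hthis
            by_cases hs : s = c + 1
            · rw [if_pos hs] at hthis
              rw [hthis]
              subst hs
              simp [fmtAll, fmtRun_eq, List.append_assoc]
            · have hsc : ¬(s = c) := by
                have := noneRuns_start_ge (y :: ys) (c + 1) s e tail hr
                omega
              rw [if_neg hs] at hthis
              have e1 : c + 1 - 1 = c := by ring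
              rw [e1] at hthis
              rw [hthis]
              simp [hs, fmtAll, fmtRun_eq, closePart, hcy.ne, List.append_assoc]
      · -- tracker = 1, head is a None: the open run continues
        intro _
        rw [stepA1_none x xs c cy st hx, findNoneLoop_acc]
        rw [noneRuns_cons_none x xs c hx]
        rcases xs with _ | ⟨y, ys⟩
        · have hc : c = cy := by simp at hlen; omega
          subst hc
          simp only [noneRuns, findNoneLoop, fmtAll]
          by_cases hst : c = st <;> simp [closePart, hst]
        · have hcy : c < cy := by
            have h1 : (1 : Int) ≤ ((y :: ys).length : Int) := by
              simp only [List.length_cons]; push_cast; omega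
            omega
          have hif : (if c = cy ∧ ¬(c = st) then ("-").toList ++ PySem.Int.toChars c else [])
              = ([] : List Char) := by
            simp [hcy.ne]
          rw [hif]
          have hthis := (ih cy (c + 1) st hlen).2 (by simp)
          cases hr : noneRuns (y :: ys) (c + 1) with
          | nil =>
            rw [hr] at hthis
            simp only at hthis
            have e1 : c + 1 - 1 = c := by ring
            rw [e1] at hthis
            rw [hthis]
            simp [fmtAll, closePart, hcy.ne]
          | cons p tail =>
            obtain ⟨s, e⟩ := p
            rw [hr] at hthis
            simp only at hthis
            by_cases hs : s = c + 1
            · rw [if_pos hs] at hthis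
              rw [hthis]
              subst hs
              simp
            · have hsc : ¬(s = c) := by
                have := noneRuns_start_ge (y :: ys) (c + 1) s e tail hr
                omega
              rw [if_neg hs] at hthis
              have e1 : c + 1 - 1 = c := by ring
              rw [e1] at hthis
              rw [hthis]
              simp [hs, fmtAll, closePart, hcy.ne, List.append_assoc]
    · have hx' : PySem.Chars.isIn ['N', 'o', 'n', 'e'] x.toList = false := by
        rw [Bool.not_eq_true] at hx; exact hx
      have hnr := noneRuns_cons_not x xs c hx'
      constructor
      · rw [stepA0_not x xs c cy st hx', (ih cy (c + 1) st hlen).1, hnr]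
      · intro _
        rw [stepA1_not x xs c cy st hx', findNoneLoop_acc, (ih cy (c + 1) st hlen).1, hnr]
        cases hr : noneRuns xs (c + 1) with
        | nil => simp [fmtAll]
        | cons p tail =>
          obtain ⟨s, e⟩ := p
          have hsc : ¬(s = c) := by
            have := noneRuns_start_ge xs (c + 1) s e tail hr
            omega
          simp [hsc, List.append_assoc]

-- ===== VERDICT (by name: the statement is the Claim_ definition above) =====
theorem find_none_spec : Claim_equal_find_none := by
  intro list1 _
  unfold Spec_find_none find_none find_none_alt
  have h := (main_inv list1 ((list1.length : Int) - 1) 0 0 (by omega)).1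
  rw [h]
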